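-- pv_equiv track=rewrite | github.com/xkimido/algorithms | 프로그래머스/1/12930. 이상한 문자 만들기/이상한 문자 만들기.py | solution
-- ===== SOURCE A (Python) =====
-- def solution(s):
--     arr= s.split(" ")
--     answer_list = []
--     for i in range(len(arr)):
--         temp = arr[i]
--         temp_list = list(map(str,temp))
--         for j in range(len(temp_list)):
--             if j % 2 == 0:
--                 temp_list[j] = temp_list[j].upper()
--             else:
--                 temp_list[j] = temp_list[j].lower()
--         item = "".join(temp_list)
--         answer_list.append(item)
--
--     answer = " ".join(answer_list)
--     return answer
-- ===== SOURCE B (Python) =====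
-- def solution(s):
--     out = []
--     k = 0
--     for ch in s:
--         if ch == " ":
--             out.append(ch)
--             k = 0
--         else:
--             out.append(ch.upper() if k % 2 == 0 else ch.lower())
--             k += 1
--     return "".join(out)
-- ===== Notes on version B (the rewrite author's own statement) =====
-- stated objective: alternative
-- what changed: Replaced the split/per-word-index-loop/join pipeline with a single left-to-right pass that keeps an in-word position counter reset at each space, building the output directly.
import Mathlib
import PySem

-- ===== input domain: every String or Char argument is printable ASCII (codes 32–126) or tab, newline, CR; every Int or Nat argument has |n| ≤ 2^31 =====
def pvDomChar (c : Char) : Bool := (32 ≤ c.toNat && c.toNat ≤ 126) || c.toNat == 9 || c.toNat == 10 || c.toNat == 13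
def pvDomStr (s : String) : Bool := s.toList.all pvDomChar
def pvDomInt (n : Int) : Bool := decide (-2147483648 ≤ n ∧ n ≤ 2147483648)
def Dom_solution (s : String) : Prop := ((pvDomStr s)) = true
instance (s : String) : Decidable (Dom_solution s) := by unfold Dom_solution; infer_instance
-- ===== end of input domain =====

-- B is a single pass with a per-word position counter reset at each space (no split/join); same cost, different structure.

-- ===== PORT A =====
-- A: split on " ", alternate-case each word by an index loop that sets list cells, join with " ".
def solution (s : String) : String :=
  let arr := PySem.Chars.splitOn s.toList [' ']
  let answer_list := (List.range arr.length).foldl (fun al i =>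
    let temp := arr.getD i []
    -- list(map(str, temp)) is the identity on the character list
    let temp_list := (List.range temp.length).foldl (fun tl j =>
      tl.set j (if j % 2 == 0 then PySem.Chars.upperChar (tl.getD j ' ')
                else PySem.Chars.lowerChar (tl.getD j ' '))) temp
    al ++ [temp_list]) []
  String.ofList (PySem.Chars.join [' '] answer_list)

-- ===== PORT B =====
-- B: one pass; state = (output so far, in-word counter), counter resets at each space.
def solution_alt (s : String) : String :=
  let st := s.toList.foldl (fun (st : List Char × Nat) ch =>
    if ch = ' ' then (st.1 ++ [ch], 0)
    else (st.1 ++ [if st.2 % 2 == 0 then PySem.Chars.upperChar ch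
                   else PySem.Chars.lowerChar ch], st.2 + 1)) ([], 0)
  String.ofList st.1

-- ===== PRECONDITION & SPEC =====
def Spec_solution (s : String) (out : String) : Prop := out = solution_alt s
instance (s : String) (out : String) : Decidable (Spec_solution s out) := by unfold Spec_solution; infer_instance

-- ===== CLAIM (what is proved, stated in full; the proofs are below) =====
def Claim_equal_solution : Prop := ∀ (s : String), Dom_solution s → Spec_solution s (solution s)

-- ===== LEMMAS AND PROOFS =====

-- the character transform at in-word index j
def pvG (j : Nat) (c : Char) : Char :=
  if j % 2 == 0 then PySem.Chars.upperChar c else PySem.Chars.lowerChar c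

-- natural recursive splitter on a single space, with an explicit current-word prefix
def pvSplit (pre : List Char) : List Char → List (List Char)
  | [] => [pre]
  | c :: rest => if c = ' ' then pre :: pvSplit [] rest else pvSplit (pre ++ [c]) rest

-- B's loop written as plain structural recursion
def pvB : List Char → Nat → List Char
  | [], _ => []
  | c :: rest, k =>
    if c = ' ' then ' ' :: pvB rest 0 else pvG k c :: pvB rest (k + 1)

theorem pvSplit_ne_nil (cs : List Char) (pre : List Char) : pvSplit pre cs ≠ [] := by
  cases cs with
  | nil => simp [pvSplit]
  | cons c rest =>
    simp only [pvSplit]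
    split_ifs
    · simp
    · exact pvSplit_ne_nil rest _

theorem pvGo_eq (fuel : Nat) : ∀ (l cur : List Char) (hacc : List (List Char)),
    l.length < fuel →
    PySem.Chars.splitOn.go [' '] fuel l cur hacc = hacc.reverse ++ pvSplit cur.reverse l := by
  induction fuel with
  | zero => intro l cur hacc h; omega
  | succ n ih =>
    intro l cur hacc h
    cases l with
    | nil => simp [PySem.Chars.splitOn.go, pvSplit]
    | cons c rest =>
      simp only [PySem.Chars.splitOn.go]
      by_cases hc : c = ' '
      · have hp : List.isPrefixOf [' '] (c :: rest) = true := by simp [hc, List.isPrefixOf]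
        rw [if_pos hp]
        simp only [List.length_cons] at h
        rw [ih _ _ _ (by simpa using Nat.lt_of_succ_lt_succ h)]
        simp [pvSplit, hc]
      · have hp : List.isPrefixOf [' '] (c :: rest) = false := by
          simp [List.isPrefixOf]; exact fun e => hc e.symm
        rw [if_neg (by simp [hp])]
        simp only [List.length_cons] at h
        rw [ih _ _ _ (Nat.lt_of_succ_lt_succ h)]
        simp [pvSplit, hc]

theorem pvSplitOn_eq (cs : List Char) :
    PySem.Chars.splitOn cs [' '] = pvSplit [] cs := by
  have := pvGo_eq (cs.length + 1) cs [] [] (by omega)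
  simpa [PySem.Chars.splitOn] using this

-- A's inner index loop is mapIdx pvG
theorem pvInner_take (l : List Char) : ∀ k, k ≤ l.length →
    (List.range k).foldl (fun tl j =>
      tl.set j (if j % 2 == 0 then PySem.Chars.upperChar (tl.getD j ' ')
                else PySem.Chars.lowerChar (tl.getD j ' '))) l
      = (l.take k).mapIdx pvG ++ l.drop k := by
  intro k
  induction k with
  | zero => intro _; simp
  | succ m ih =>
    intro h
    have hm : m ≤ l.length := by omega
    have hml : m < l.length := by omega
    rw [List.range_succ, List.foldl_append, ih hm]
    have hlen : ((l.take m).mapIdx pvG).length = m := by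
      simp [List.length_take, Nat.min_eq_left hm]
    have hdrop : l.drop m = l[m] :: l.drop (m+1) := List.drop_eq_getElem_cons hml
    have hgetD : ((l.take m).mapIdx pvG ++ l.drop m).getD m ' ' = l[m] := by
      rw [List.getD_append_right _ _ _ _ (by omega), hlen, hdrop]
      simp [List.getElem?_eq_getElem hml]
    have hset : ∀ x, ((l.take m).mapIdx pvG ++ l.drop m).set m x
        = (l.take m).mapIdx pvG ++ x :: l.drop (m+1) := by
      intro x
      rw [List.set_append_right _ _ (by omega), hlen, Nat.sub_self, hdrop,
        List.set_cons_zero]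
    simp only [List.foldl_cons, List.foldl_nil, hgetD, hset]
    have htake : l.take (m+1) = l.take m ++ [l[m]] := by
      rw [List.take_add_one]; simp [hml]
    rw [htake, List.mapIdx_append]
    simp [pvG, List.length_take, Nat.min_eq_left hm]

theorem pvInner_eq (l : List Char) :
    (List.range l.length).foldl (fun tl j =>
      tl.set j (if j % 2 == 0 then PySem.Chars.upperChar (tl.getD j ' ')
                else PySem.Chars.lowerChar (tl.getD j ' '))) l = l.mapIdx pvG := by
  simpa using pvInner_take l l.length (le_refl _)

-- A's outer index loop maps the (already characterised) inner loop over the words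
theorem pvOuter_take (arr : List (List Char)) : ∀ k, k ≤ arr.length →
    (List.range k).foldl (fun al i =>
      al ++ [(List.range ((arr.getD i []).length)).foldl (fun tl j =>
        tl.set j (if j % 2 == 0 then PySem.Chars.upperChar (tl.getD j ' ')
                  else PySem.Chars.lowerChar (tl.getD j ' '))) (arr.getD i [])]) []
      = (arr.take k).map (fun w => w.mapIdx pvG) := by
  intro k
  induction k with
  | zero => intro _; simp
  | succ m ih =>
    intro h
    have hm : m ≤ arr.length := by omega
    have hml : m < arr.length := by omega
    rw [List.range_succ, List.foldl_append, ih hm]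
    have hg : arr.getD m [] = arr[m] := by
      simp [List.getD, List.getElem?_eq_getElem hml]
    have htake : arr.take (m+1) = arr.take m ++ [arr[m]] := by
      rw [List.take_add_one]; simp [hml]
    simp only [List.foldl_cons, List.foldl_nil, hg, pvInner_eq, htake, List.map_append,
      List.map_cons, List.map_nil]

-- join over the splitter equals B's single pass
theorem pvMain (cs : List Char) : ∀ pre,
    PySem.Chars.join [' '] ((pvSplit pre cs).map (fun w => w.mapIdx pvG))
      = pre.mapIdx pvG ++ pvB cs pre.length := by
  induction cs with
  | nil =>
    intro pre
    simp [pvSplit, pvB, PySem.Chars.join_singleton]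
  | cons c rest ih =>
    intro pre
    by_cases hc : c = ' '
    · subst hc
      obtain ⟨b, t, hbt⟩ : ∃ b t, pvSplit ([] : List Char) rest = b :: t := by
        cases hsp : pvSplit ([] : List Char) rest with
        | nil => exact absurd hsp (pvSplit_ne_nil rest [])
        | cons b t => exact ⟨b, t, rfl⟩
      have hIH := ih []
      rw [hbt, List.map_cons] at hIH
      rw [show pvSplit pre (' ' :: rest) = pre :: pvSplit [] rest from by simp [pvSplit]]
      rw [hbt, List.map_cons, List.map_cons, PySem.Chars.join_cons_cons, hIH]
      rw [show pvB (' ' :: rest) pre.length = ' ' :: pvB rest 0 from by simp [pvB]]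
      simp
    · rw [show pvSplit pre (c :: rest) = pvSplit (pre ++ [c]) rest from by simp [pvSplit, hc]]
      rw [ih (pre ++ [c]), List.mapIdx_append]
      rw [show pvB (c :: rest) pre.length = pvG pre.length c :: pvB rest (pre.length + 1)
        from by simp [pvB, hc]]
      simp

-- B's foldl accumulates pvB
theorem pvBfold (cs : List Char) : ∀ (out : List Char) (k : Nat),
    (cs.foldl (fun (st : List Char × Nat) ch =>
      if ch = ' ' then (st.1 ++ [ch], 0)
      else (st.1 ++ [if st.2 % 2 == 0 then PySem.Chars.upperChar ch
                     else PySem.Chars.lowerChar ch], st.2 + 1)) (out, k)).1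
      = out ++ pvB cs k := by
  induction cs with
  | nil => intro out k; simp [pvB]
  | cons c rest ih =>
    intro out k
    by_cases hc : c = ' '
    · subst hc
      rw [List.foldl_cons]
      simp only [reduceIte]
      rw [ih]
      simp [pvB]
    · rw [List.foldl_cons]
      simp only [if_neg hc]
      rw [ih]
      simp [pvB, hc, pvG]

-- ===== VERDICT (by name: the statement is the Claim_ definition above) =====
theorem solution_spec : Claim_equal_solution := by
  intro s _
  unfold Spec_solution solution solution_alt
  simp only
  rw [pvBfold s.toList [] 0, List.nil_append, pvSplitOn_eq]
  rw [pvOuter_take (pvSplit [] s.toList) (pvSplit [] s.toList).length (le_refl _),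
    List.take_length]
  have := pvMain s.toList []
  simp only [List.mapIdx_nil, List.nil_append, List.length_nil] at this
  rw [this]
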